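-- pv_equiv track=rewrite | github.com/izackv/rh-preproc-sos | preproc-sos.py | truncate_to_word_limit
-- ===== SOURCE A (Python) =====
-- WORD_TRUNCATION_NOTICE = "\n\n... [TRUNCATED — content exceeded word limit, showing last {n} words] ...\n\n"
--
-- def count_words(text: str) -> int:
--     """Count words in text."""
--     return len(text.split())
--
-- def truncate_to_word_limit(content: str, max_words: int) -> tuple[str, bool]:
--     """
--     Truncate content to max_words, keeping the end (most recent data).
--     Preserves line structure by truncating whole lines.
--     Returns (truncated_content, was_truncated).
--     """
--     total_words = count_words(content)
--     if total_words <= max_words: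
--         return content, False
--
--     # Truncate by lines from the end, preserving line breaks
--     lines = content.splitlines(keepends=True)
--     kept_lines = []
--     word_count = 0
--
--     # Work backwards, keeping lines until we hit the word limit
--     for line in reversed(lines):
--         line_words = len(line.split())
--         if word_count + line_words > max_words:
--             break
--         kept_lines.append(line)
--         word_count += line_words
--
--     # Reverse to restore original order
--     kept_lines.reverse()
--     notice = WORD_TRUNCATION_NOTICE.format(limit=max_words, n=word_count)
--     return notice + "".join(kept_lines), True
-- ===== SOURCE B (Python) =====
-- WORD_TRUNCATION_NOTICE = "\n\n... [TRUNCATED — content exceeded word limit, showing last {n} words] ...\n\n"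
--
--
-- def truncate_to_word_limit(content, max_words):
--     if len(content.split()) <= max_words:
--         return content, False
--     # Drop whole lines from the FRONT until the remaining suffix fits.
--     lines = content.splitlines(keepends=True)
--     counts = [len(line.split()) for line in lines]
--     remaining = sum(counts)
--     cut = 0
--     while cut < len(lines) and remaining > max_words:
--         remaining -= counts[cut]
--         cut += 1
--     notice = WORD_TRUNCATION_NOTICE.format(limit=max_words, n=remaining)
--     return notice + "".join(lines[cut:]), True
-- ===== Notes on version B (the rewrite author's own statement) =====
-- stated objective: alternative
-- what changed: Instead of walking the lines backwards accumulating kept lines and reversing twice, B precomputes per-line word counts and scans forward, dropping whole lines from the front until the remaining suffix fits, then takes a single slice.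
import Mathlib
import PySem

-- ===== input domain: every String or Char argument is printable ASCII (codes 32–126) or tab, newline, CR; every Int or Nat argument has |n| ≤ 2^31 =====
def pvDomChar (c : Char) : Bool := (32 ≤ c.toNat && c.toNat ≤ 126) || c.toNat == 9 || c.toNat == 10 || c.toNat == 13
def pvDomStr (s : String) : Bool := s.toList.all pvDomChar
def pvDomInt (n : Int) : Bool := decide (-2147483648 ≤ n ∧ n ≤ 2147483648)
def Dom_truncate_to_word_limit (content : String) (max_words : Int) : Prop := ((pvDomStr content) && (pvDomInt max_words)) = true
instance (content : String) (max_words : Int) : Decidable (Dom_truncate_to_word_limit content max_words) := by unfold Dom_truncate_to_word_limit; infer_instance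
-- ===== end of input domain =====

-- B replaces A's backward keep-lines-then-reverse accumulation with a forward pass that drops
-- whole lines from the front (precomputed per-line counts, single slice); objective: alternative.

-- shared helper: Python str.splitlines(keepends=True), exact on the Dom alphabet
-- (the only line-break characters admitted by Dom are '\n', '\r' and "\r\n")
def pvSplitlinesKeep (acc : List Char) : List Char → List (List Char)
  | [] => if acc.isEmpty then [] else [acc.reverse]
  | '\r' :: '\n' :: rest => (acc.reverse ++ ['\r', '\n']) :: pvSplitlinesKeep [] rest
  | '\r' :: rest => (acc.reverse ++ ['\r']) :: pvSplitlinesKeep [] rest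
  | '\n' :: rest => (acc.reverse ++ ['\n']) :: pvSplitlinesKeep [] rest
  | c :: rest => pvSplitlinesKeep (c :: acc) rest
termination_by cs => cs.length

-- len(line.split())
def pvWordLen (l : List Char) : Int := ((PySem.Chars.split₀ l).length : Int)

-- WORD_TRUNCATION_NOTICE.format(limit=max_words, n=n)  (only {n} occurs in the template)
def pvNotice (n : Int) : String :=
  "\n\n... [TRUNCATED — content exceeded word limit, showing last " ++ PySem.Int.toStr n ++ " words] ...\n\n"

-- ===== PORT A =====
-- A's backward for-loop with break: kept lines accumulated by append, reversed at the end
def pvALoop (max_words : Int) : List (List Char) → List (List Char) → Int → List (List Char) × Int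
  | [], kept, wc => (kept, wc)
  | l :: ls, kept, wc =>
    if wc + pvWordLen l > max_words then (kept, wc)
    else pvALoop max_words ls (kept ++ [l]) (wc + pvWordLen l)

def truncate_to_word_limit (content : String) (max_words : Int) : String × Bool :=
  let total_words : Int := ((PySem.Str.split₀ content).length : Int)
  if total_words ≤ max_words then (content, false)
  else
    let lines := pvSplitlinesKeep [] content.toList
    let r := pvALoop max_words lines.reverse [] 0
    let kept := r.1.reverse
    (pvNotice r.2 ++ String.ofList kept.flatten, true)

-- ===== PORT B =====
-- B's forward while-loop: drop leading lines while the remaining word count still exceeds the limit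
def pvBLoop (max_words : Int) : List Int → Nat → Int → Nat × Int
  | [], cut, remaining => (cut, remaining)
  | c :: cs, cut, remaining =>
    if remaining > max_words then pvBLoop max_words cs (cut + 1) (remaining - c)
    else (cut, remaining)

def truncate_to_word_limit_alt (content : String) (max_words : Int) : String × Bool :=
  if ((PySem.Str.split₀ content).length : Int) ≤ max_words then (content, false)
  else
    let lines := pvSplitlinesKeep [] content.toList
    let counts := lines.map pvWordLen
    let r := pvBLoop max_words counts 0 counts.sum
    (pvNotice r.2 ++ String.ofList ((lines.drop r.1).flatten), true)

-- ===== PRECONDITION & SPEC =====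
def Spec_truncate_to_word_limit (content : String) (max_words : Int) (out : String × Bool) : Prop := out = truncate_to_word_limit_alt content max_words
instance (content : String) (max_words : Int) (out : String × Bool) : Decidable (Spec_truncate_to_word_limit content max_words out) := by unfold Spec_truncate_to_word_limit; infer_instance

-- ===== CLAIM (what is proved, stated in full; the proofs are below) =====
def Claim_equal_truncate_to_word_limit : Prop := ∀ (content : String) (max_words : Int), Dom_truncate_to_word_limit content max_words → Spec_truncate_to_word_limit content max_words (truncate_to_word_limit content max_words)

-- ===== LEMMAS AND PROOFS =====

-- the common specification: the longest suffix of the lines whose word count is ≤ max_words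
def pvKeep (max_words : Int) : List (List Char) → List (List Char)
  | [] => []
  | l :: ls => if ((l :: ls).map pvWordLen).sum ≤ max_words then l :: ls else pvKeep max_words ls

-- greedy prefix of a (reversed) line list: keep while the running word count stays ≤ max_words
def pvFtake (max_words : Int) (wc : Int) : List (List Char) → List (List Char)
  | [] => []
  | l :: ls => if wc + pvWordLen l > max_words then [] else l :: pvFtake max_words (wc + pvWordLen l) ls

theorem pvWordLen_nonneg (l : List Char) : 0 ≤ pvWordLen l := Int.natCast_nonneg _

theorem pvWsum_nonneg (ls : List (List Char)) : 0 ≤ (ls.map pvWordLen).sum := by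
  induction ls with
  | nil => simp
  | cons l ls ih => simpa using add_nonneg (pvWordLen_nonneg l) ih

theorem pvFtake_of_gt (m wc : Int) (ss : List (List Char)) (h : m < wc) :
    pvFtake m wc ss = [] := by
  cases ss with
  | nil => rfl
  | cons l ls =>
    have := pvWordLen_nonneg l
    rw [pvFtake, if_pos (by omega)]

theorem pvALoop_eq_ftake (m : Int) (rs : List (List Char)) : ∀ kept wc,
    pvALoop m rs kept wc =
      (kept ++ pvFtake m wc rs, wc + ((pvFtake m wc rs).map pvWordLen).sum) := by
  induction rs with
  | nil => intro kept wc; simp [pvALoop, pvFtake]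
  | cons l ls ih =>
    intro kept wc
    by_cases h : wc + pvWordLen l > m
    · simp [pvALoop, pvFtake, h]
    · simp only [pvALoop, pvFtake, if_neg h, ih]
      simp [add_assoc]

theorem pvFtake_append (m : Int) (rs ss : List (List Char)) : ∀ wc,
    pvFtake m wc (rs ++ ss) =
      if wc + (rs.map pvWordLen).sum ≤ m then rs ++ pvFtake m (wc + (rs.map pvWordLen).sum) ss
      else pvFtake m wc rs := by
  induction rs with
  | nil =>
    intro wc
    by_cases h : wc + (([] : List (List Char)).map pvWordLen).sum ≤ m
    · rw [if_pos h]; simp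
    · rw [if_neg h]
      simp only [List.map_nil, List.sum_nil, add_zero] at h
      rw [List.nil_append, pvFtake_of_gt m wc ss (by omega)]
      rfl
  | cons l ls ih =>
    intro wc
    by_cases h : wc + pvWordLen l > m
    · have hs := pvWsum_nonneg ls
      have h2 : ¬ wc + ((l :: ls).map pvWordLen).sum ≤ m := by
        simp only [List.map_cons, List.sum_cons]; omega
      rw [if_neg h2]
      simp [pvFtake, h]
    · simp only [List.cons_append, pvFtake, if_neg h, ih (wc + pvWordLen l),
        List.map_cons, List.sum_cons]
      by_cases h3 : wc + (pvWordLen l + (ls.map pvWordLen).sum) ≤ m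
      · rw [if_pos (by omega), if_pos h3]
        simp [add_assoc]
      · rw [if_neg (by omega), if_neg h3]

theorem pvKeep_of_le (m : Int) (ls : List (List Char)) (h : (ls.map pvWordLen).sum ≤ m) :
    pvKeep m ls = ls := by
  cases ls with
  | nil => rfl
  | cons l ls => rw [pvKeep, if_pos h]

theorem pvFtake_rev_eq_keep (m : Int) (ls : List (List Char)) :
    pvFtake m 0 ls.reverse = (pvKeep m ls).reverse := by
  induction ls with
  | nil => simp [pvFtake, pvKeep]
  | cons l ls ih =>
    rw [List.reverse_cons, pvFtake_append]
    have hrev : (ls.reverse.map pvWordLen).sum = (ls.map pvWordLen).sum := by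
      rw [List.map_reverse, List.sum_reverse]
    by_cases h : 0 + (ls.reverse.map pvWordLen).sum ≤ m
    · rw [if_pos h]
      by_cases h2 : ((l :: ls).map pvWordLen).sum ≤ m
      · simp only [List.map_cons, List.sum_cons] at h2
        rw [pvFtake, if_neg (by omega), pvKeep, if_pos (by simp only [List.map_cons, List.sum_cons]; omega)]
        simp [pvFtake]
      · simp only [List.map_cons, List.sum_cons] at h2
        rw [pvFtake, if_pos (by omega), List.append_nil, pvKeep,
          if_neg (by simp only [List.map_cons, List.sum_cons]; omega),
          pvKeep_of_le m ls (by omega)]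
    · rw [if_neg h, ih]
      have h2 : ¬ ((l :: ls).map pvWordLen).sum ≤ m := by
        have := pvWordLen_nonneg l
        simp only [List.map_cons, List.sum_cons]
        omega
      rw [pvKeep, if_neg h2]

theorem pvKeep_suffix (m : Int) (ls : List (List Char)) : pvKeep m ls <:+ ls := by
  induction ls with
  | nil => simp [pvKeep]
  | cons l ls ih =>
    rw [pvKeep]
    split_ifs
    · exact List.suffix_refl _
    · exact ih.trans (List.suffix_cons l ls)

theorem pvKeep_len_le (m : Int) (ls : List (List Char)) : (pvKeep m ls).length ≤ ls.length :=
  (pvKeep_suffix m ls).length_le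

theorem pvBLoop_eq (m : Int) (ls : List (List Char)) : ∀ cut,
    pvBLoop m (ls.map pvWordLen) cut (ls.map pvWordLen).sum =
      (cut + (ls.length - (pvKeep m ls).length), ((pvKeep m ls).map pvWordLen).sum) := by
  induction ls with
  | nil => intro cut; simp [pvBLoop, pvKeep]
  | cons l ls ih =>
    intro cut
    simp only [List.map_cons, List.sum_cons, pvBLoop]
    by_cases h : pvWordLen l + (ls.map pvWordLen).sum > m
    · rw [if_pos h]
      have harg : pvWordLen l + (ls.map pvWordLen).sum - pvWordLen l = (ls.map pvWordLen).sum := by ring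
      rw [harg, ih (cut + 1)]
      have hk : ¬ ((l :: ls).map pvWordLen).sum ≤ m := by
        simp only [List.map_cons, List.sum_cons]; omega
      rw [pvKeep, if_neg hk]
      have := pvKeep_len_le m ls
      simp only [Prod.mk.injEq, List.length_cons, and_true]
      omega
    · rw [if_neg h]
      have hk : ((l :: ls).map pvWordLen).sum ≤ m := by
        simp only [List.map_cons, List.sum_cons]; omega
      rw [pvKeep, if_pos hk]
      simp

theorem pvDrop_eq_keep (m : Int) (ls : List (List Char)) :
    ls.drop (ls.length - (pvKeep m ls).length) = pvKeep m ls := by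
  obtain ⟨t, ht⟩ := pvKeep_suffix m ls
  generalize hk : pvKeep m ls = k at *
  rw [← ht]
  rw [show (t ++ k).length - k.length = t.length by simp, List.drop_left]

-- ===== VERDICT (by name: the statement is the Claim_ definition above) =====
theorem truncate_to_word_limit_spec : Claim_equal_truncate_to_word_limit := by
  intro content max_words _
  unfold Spec_truncate_to_word_limit truncate_to_word_limit truncate_to_word_limit_alt
  by_cases h : ((PySem.Str.split₀ content).length : Int) ≤ max_words
  · simp [h]
  · simp only [if_neg h]
    rw [pvALoop_eq_ftake, pvFtake_rev_eq_keep, pvBLoop_eq]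
    simp only [List.nil_append, List.reverse_reverse, pvDrop_eq_keep,
      List.map_reverse, List.sum_reverse, zero_add]
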